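-- pv_equiv track=rewrite | github.com/dmendelsohn/advent_of_code | 2015/day03/advent3.py | getVisitedDict
-- ===== SOURCE A (Python) =====
-- OFFSET = {"^":(0,1), "v":(0,-1), "<": (-1, 0), ">":(1, 0)}
--
-- def getVisitedDict(moves):
-- 	(x, y) = (0, 0)
-- 	visited = {(x,y): None}
-- 	for char in moves:
-- 		if char in OFFSET:
-- 			(dx, dy) = OFFSET[char]
-- 		else:
-- 			(dx, dy) = (0, 0)
-- 		(x, y) = (x+dx, y+dy)
-- 		visited[(x,y)] = None
-- 	return visited
-- ===== SOURCE B (Python) =====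
-- OFFSET = {"^":(0,1), "v":(0,-1), "<": (-1, 0), ">":(1, 0)}
--
-- def getVisitedDict(moves):
--     # Divide and conquer: solve(s) returns (net displacement, list of positions
--     # visited relative to the start, start excluded). The two half-solutions are
--     # merged by translating the right half's path by the left half's net displacement.
--     def solve(s):
--         if len(s) == 0:
--             return ((0, 0), [])
--         if len(s) == 1:
--             d = OFFSET.get(s, (0, 0))
--             return (d, [d])
--         mid = len(s) // 2
--         (dl, pl) = solve(s[:mid])
--         (dr, pr) = solve(s[mid:])
--         return ((dl[0] + dr[0], dl[1] + dr[1]),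
--                 pl + [(dl[0] + x, dl[1] + y) for (x, y) in pr])
--     (_, path) = solve(moves)
--     return dict.fromkeys([(0, 0)] + path)
-- ===== Notes on version B (the rewrite author's own statement) =====
-- stated objective: alternative
-- what changed: B replaces A's left-to-right loop (incrementally updating the position and inserting into the dict) by a divide-and-conquer recursion that splits the move string in half, computes each half's (net displacement, relative path) independently, merges them by translating the right half's path by the left half's displacement, and deduplicates the assembled path once at the end.
import Mathlib
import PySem

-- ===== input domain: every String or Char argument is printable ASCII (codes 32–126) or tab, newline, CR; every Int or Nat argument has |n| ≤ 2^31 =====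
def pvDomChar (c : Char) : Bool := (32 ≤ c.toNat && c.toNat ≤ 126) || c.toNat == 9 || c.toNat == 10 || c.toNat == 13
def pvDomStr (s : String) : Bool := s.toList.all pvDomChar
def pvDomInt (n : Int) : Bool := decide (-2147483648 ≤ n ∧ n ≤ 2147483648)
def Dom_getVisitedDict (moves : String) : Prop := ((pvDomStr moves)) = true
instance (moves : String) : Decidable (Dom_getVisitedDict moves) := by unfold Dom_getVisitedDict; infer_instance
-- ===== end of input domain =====

-- B replaces A's left-to-right loop by a divide-and-conquer recursion: split the moves in
-- half, solve each half for (net displacement, relative path), merge by translating the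
-- right half's path, and deduplicate once at the end.

def OFFSET : PySem.Dict Char (Int × Int) :=
  PySem.Dict.ofList [('^', (0, 1)), ('v', (0, -1)), ('<', (-1, 0)), ('>', (1, 0))]

-- ===== PORT A =====
def getVisitedDict (moves : String) : List (Int × Int × Option Int) :=
  let init : (Int × Int) × PySem.Dict (Int × Int) (Option Int) :=
    ((0, 0), (PySem.Dict.empty).insert (0, 0) none)
  let fin := moves.toList.foldl (fun st c =>
      let d := if OFFSET.contains c then OFFSET.getD c (0, 0) else (0, 0)
      let p := (st.1.1 + d.1, st.1.2 + d.2)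
      (p, st.2.insert p none)) init
  fin.2.items.map (fun p => (p.1.1, p.1.2, p.2))

-- ===== PORT B =====
-- solve(s): (net displacement of s, positions visited relative to the start, start excluded)
def solveB : List Char → (Int × Int) × List (Int × Int)
  | [] => ((0, 0), [])
  | [c] => let d := OFFSET.getD c (0, 0); (d, [d])
  | c1 :: c2 :: rest =>
      let l := c1 :: c2 :: rest
      let mid := l.length / 2
      let L := solveB (l.take mid)
      let R := solveB (l.drop mid)
      ((L.1.1 + R.1.1, L.1.2 + R.1.2),
       L.2 ++ R.2.map (fun p => (L.1.1 + p.1, L.1.2 + p.2)))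
termination_by l => l.length
decreasing_by
  · simp [List.length_take]; omega
  · simp [List.length_drop]; omega

def getVisitedDict_alt (moves : String) : List (Int × Int × Option Int) :=
  let path := (solveB moves.toList).2
  (PySem.Set.ofList ((0, 0) :: path)).map (fun p => (p.1, p.2, (none : Option Int)))

-- ===== PRECONDITION & SPEC =====
def Spec_getVisitedDict (moves : String) (out : List (Int × Int × Option Int)) : Prop := out = getVisitedDict_alt moves
instance (moves : String) (out : List (Int × Int × Option Int)) : Decidable (Spec_getVisitedDict moves out) := by unfold Spec_getVisitedDict; infer_instance

-- ===== CLAIM (what is proved, stated in full; the proofs are below) =====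
def Claim_equal_getVisitedDict : Prop := ∀ (moves : String), Dom_getVisitedDict moves → Spec_getVisitedDict moves (getVisitedDict moves)

-- ===== LEMMAS AND PROOFS =====

-- the positions visited after start p by delta list l (excluding p itself)
def pvWalk (p : Int × Int) : List (Int × Int) → List (Int × Int)
  | [] => []
  | d :: ds => (p.1 + d.1, p.2 + d.2) :: pvWalk (p.1 + d.1, p.2 + d.2) ds

-- the endpoint of the walk
def pvEnd (p : Int × Int) (l : List (Int × Int)) : Int × Int :=
  l.foldl (fun q d => (q.1 + d.1, q.2 + d.2)) p

theorem pvWalk_shift (a : Int × Int) (l : List (Int × Int)) (p : Int × Int) :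
    pvWalk (a.1 + p.1, a.2 + p.2) l = (pvWalk p l).map (fun q => (a.1 + q.1, a.2 + q.2)) := by
  induction l generalizing p with
  | nil => rfl
  | cons d ds ih =>
      simp only [pvWalk, List.map_cons]
      have := ih (p.1 + d.1, p.2 + d.2)
      rw [show a.1 + (p.1 + d.1) = a.1 + p.1 + d.1 from (add_assoc _ _ _).symm,
          show a.2 + (p.2 + d.2) = a.2 + p.2 + d.2 from (add_assoc _ _ _).symm] at this ⊢
      rw [this]

theorem pvEnd_shift (a : Int × Int) (l : List (Int × Int)) (p : Int × Int) :
    pvEnd (a.1 + p.1, a.2 + p.2) l = (a.1 + (pvEnd p l).1, a.2 + (pvEnd p l).2) := by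
  induction l generalizing p with
  | nil => rfl
  | cons d ds ih =>
      simp only [pvEnd, List.foldl_cons] at *
      have := ih (p.1 + d.1, p.2 + d.2)
      simpa [add_assoc] using this

theorem pvWalk_append (l₁ l₂ : List (Int × Int)) (p : Int × Int) :
    pvWalk p (l₁ ++ l₂) = pvWalk p l₁ ++ pvWalk (pvEnd p l₁) l₂ := by
  induction l₁ generalizing p with
  | nil => rfl
  | cons d ds ih => simp [pvWalk, pvEnd, List.foldl_cons, ih]

-- characterization of the divide-and-conquer solver
theorem solveB_eq (l : List Char) :
    solveB l = (pvEnd (0, 0) (l.map (fun c => OFFSET.getD c (0, 0))),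
                pvWalk (0, 0) (l.map (fun c => OFFSET.getD c (0, 0)))) := by
  fun_induction solveB l with
  | case1 => rfl
  | case2 c => simp only [pvWalk, pvEnd, List.map_cons, List.map_nil, List.foldl_cons,
      List.foldl_nil, Prod.mk.injEq, zero_add]; exact ⟨rfl, rfl⟩
  | case3 c1 c2 rest l mid L R ihL ihR =>
      simp only [l, mid, L, R] at ihL ihR ⊢
      rw [ihL, ihR]
      have hsplit : (c1 :: c2 :: rest) =
          (c1 :: c2 :: rest).take ((c1 :: c2 :: rest).length / 2) ++
          (c1 :: c2 :: rest).drop ((c1 :: c2 :: rest).length / 2) := by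
        simp
      set A := ((c1 :: c2 :: rest).take ((c1 :: c2 :: rest).length / 2)).map
          (fun c => OFFSET.getD c (0, 0)) with hA
      set B := ((c1 :: c2 :: rest).drop ((c1 :: c2 :: rest).length / 2)).map
          (fun c => OFFSET.getD c (0, 0)) with hB
      have hmap : (c1 :: c2 :: rest).map (fun c => OFFSET.getD c (0, 0)) = A ++ B := by
        rw [hA, hB, ← List.map_append, ← hsplit]
      rw [hmap, pvWalk_append]
      have hE : pvEnd (0, 0) (A ++ B)
          = ((pvEnd (0, 0) A).1 + (pvEnd (0, 0) B).1,
             (pvEnd (0, 0) A).2 + (pvEnd (0, 0) B).2) := by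
        have h1 : pvEnd (0, 0) (A ++ B) = pvEnd (pvEnd (0, 0) A) B := by
          simp [pvEnd, List.foldl_append]
        have h2 := pvEnd_shift (pvEnd (0, 0) A) B (0, 0)
        simp only [add_zero] at h2
        rw [h1]
        rw [show pvEnd (0,0) A = ((pvEnd (0,0) A).1 + (0:Int), (pvEnd (0,0) A).2 + (0:Int)) by simp] at h1 ⊢
        simpa using h2
      have hW : pvWalk (pvEnd (0, 0) A) B
          = (pvWalk (0, 0) B).map (fun q => ((pvEnd (0, 0) A).1 + q.1, (pvEnd (0, 0) A).2 + q.2)) := by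
        have := pvWalk_shift (pvEnd (0, 0) A) B (0, 0)
        simpa using this
      rw [hE, hW]

-- A's delta branch equals getD
theorem pv_delta_eq (c : Char) :
    (if OFFSET.contains c then OFFSET.getD c (0, 0) else (0, 0)) = OFFSET.getD c (0, 0) := by
  by_cases h : OFFSET.contains c = true
  · simp [h]
  · rw [if_neg h, PySem.Dict.getD_of_not_contains]
    simpa using h

theorem pv_foldA {α : Type} (f : α → Int × Int) (l : List α) (p : Int × Int)
    (dct : PySem.Dict (Int × Int) (Option Int)) :
    (l.foldl (fun st c =>
        ((st.1.1 + (f c).1, st.1.2 + (f c).2),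
          st.2.insert (st.1.1 + (f c).1, st.1.2 + (f c).2) none)) (p, dct)).2
      = (pvWalk p (l.map f)).foldl (fun d q => d.insert q none) dct := by
  induction l generalizing p dct with
  | nil => rfl
  | cons d ds ih => simp [pvWalk, List.foldl_cons, ih]

-- every value in an all-none insert loop is none
theorem pv_getD_none (l : List (Int × Int)) (dct : PySem.Dict (Int × Int) (Option Int))
    (h : ∀ k, dct.getD k none = none) (k : Int × Int) :
    (l.foldl (fun d q => d.insert q none) dct).getD k none = none := by
  induction l generalizing dct with
  | nil => exact h k
  | cons q qs ih =>
      refine ih _ (fun k' => ?_)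
      rw [PySem.Dict.getD_insert]
      split <;> simp [h]

theorem getVisitedDict_spec_aux (moves : String) :
    getVisitedDict moves = getVisitedDict_alt moves := by
  unfold getVisitedDict getVisitedDict_alt
  simp only [pv_delta_eq, solveB_eq]
  rw [pv_foldA (fun c => OFFSET.getD c (0, 0))]
  set L := moves.toList.map (fun c => OFFSET.getD c (0, 0)) with hL
  set W := pvWalk (0, 0) L with hW
  set d0 : PySem.Dict (Int × Int) (Option Int) := (PySem.Dict.empty).insert (0, 0) none with hd0
  have hnd0 : d0.keys.Nodup := by decide
  have hnd : (W.foldl (fun d q => d.insert q none) d0).keys.Nodup :=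
    PySem.Dict.nodup_keys_foldl_insert W _ d0 hnd0
  rw [PySem.Dict.items_eq_map_keys _ hnd none]
  have hvals : ∀ k, (W.foldl (fun d q => d.insert q none) d0).getD k none = none := by
    intro k
    refine pv_getD_none W d0 (fun k' => ?_) k
    rw [hd0, PySem.Dict.getD_insert]
    split <;> simp [PySem.Dict.getD_empty]
  have hkeys : (W.foldl (fun d q => d.insert q none) d0).keys
      = PySem.Set.ofList ((0, 0) :: W) := by
    rw [PySem.Dict.keys_foldl_insert]
    have : d0.keys = [((0 : Int), (0 : Int))] := by decide
    rw [this]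
    have := PySem.Set.ofList_append [((0 : Int), (0 : Int))] W
    simpa [PySem.Set.ofList] using this.symm
  rw [hkeys]
  simp [hvals, Function.comp]

-- ===== VERDICT (by name: the statement is the Claim_ definition above) =====
theorem getVisitedDict_spec : Claim_equal_getVisitedDict := by
  intro moves _
  exact getVisitedDict_spec_aux moves
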